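-- pv_equiv track=rewrite | github.com/gauzias/sulcal_graphs_matching | script_generation_graphs_with_edges_permutation_updated.py | get_in_between_perm_matrix
-- ===== SOURCE A (Python) =====
-- def get_in_between_perm_matrix(perm_mat_1, perm_mat_2):
--     """
--     Given two permutation from noisy graphs to a reference graph,
--     Return the permutation matrix to go from one graph to the other
--     """
--     result_perm = {}
--     for i in range(len(perm_mat_1)):
--         if perm_mat_1[i] == -1:
--                 continue
--         for j in range(len(perm_mat_2)):
--             if perm_mat_2[j] == -1:
--                 continue
--
--             if perm_mat_1[i] == perm_mat_2[j]:
--                 result_perm[i] = j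
--
--     return result_perm
-- ===== SOURCE B (Python) =====
-- def get_in_between_perm_matrix(perm_mat_1, perm_mat_2):
--     """
--     Given two permutation from noisy graphs to a reference graph,
--     Return the permutation matrix to go from one graph to the other
--     """
--     last = {}
--     for j, v in enumerate(perm_mat_2):
--         if v != -1:
--             last[v] = j
--     result_perm = {}
--     for i, v in enumerate(perm_mat_1):
--         if v == -1:
--             continue
--         j = last.get(v)
--         if j is not None:
--             result_perm[i] = j
--     return result_perm
-- ===== Notes on version B (the rewrite author's own statement) =====
-- stated objective: faster
-- what changed: replaces the nested scan of perm_mat_2 for every entry of perm_mat_1 by a hash map from value to its last index in perm_mat_2 built in one pass, then a single pass over perm_mat_1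
import Mathlib
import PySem

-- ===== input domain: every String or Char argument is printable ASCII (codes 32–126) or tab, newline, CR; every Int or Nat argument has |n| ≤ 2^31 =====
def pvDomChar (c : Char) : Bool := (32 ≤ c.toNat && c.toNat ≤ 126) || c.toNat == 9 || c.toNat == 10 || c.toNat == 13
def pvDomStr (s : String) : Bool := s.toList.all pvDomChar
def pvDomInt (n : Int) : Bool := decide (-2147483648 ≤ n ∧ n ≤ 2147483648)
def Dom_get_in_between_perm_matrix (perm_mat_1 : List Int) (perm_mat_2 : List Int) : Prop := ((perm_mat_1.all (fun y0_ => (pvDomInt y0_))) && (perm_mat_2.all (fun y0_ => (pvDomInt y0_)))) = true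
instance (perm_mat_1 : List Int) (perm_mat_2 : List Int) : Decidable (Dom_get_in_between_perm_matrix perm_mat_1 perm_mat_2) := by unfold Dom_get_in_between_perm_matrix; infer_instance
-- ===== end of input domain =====

-- B replaces A's nested scan by a value→last-index map over perm_mat_2 plus one pass over perm_mat_1 (measured faster, asymptotic).

-- ===== PORT A =====
def get_in_between_perm_matrix (perm_mat_1 : List Int) (perm_mat_2 : List Int) : List (Int × Int) :=
  ((PySem.List.pyRange 0 (PySem.List.len perm_mat_1) 1).foldl (fun d i =>
      if PySem.List.pyGetD perm_mat_1 i 0 == -1 then d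
      else (PySem.List.pyRange 0 (PySem.List.len perm_mat_2) 1).foldl (fun d j =>
        if PySem.List.pyGetD perm_mat_2 j 0 == -1 then d
        else if PySem.List.pyGetD perm_mat_1 i 0 == PySem.List.pyGetD perm_mat_2 j 0 then d.insert i j
        else d) d)
    (PySem.Dict.empty)).items

-- ===== PORT B =====
-- value → last index of that value in perm_mat_2 (skipping -1): B's first loop
def pvBuildLast (perm_mat_2 : List Int) : PySem.Dict Int Int :=
  (PySem.List.enumerate perm_mat_2).foldl
    (fun d jv => if jv.2 == -1 then d else d.insert jv.2 jv.1) PySem.Dict.empty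

def get_in_between_perm_matrix_alt (perm_mat_1 : List Int) (perm_mat_2 : List Int) : List (Int × Int) :=
  let last := pvBuildLast perm_mat_2
  ((PySem.List.enumerate perm_mat_1).foldl (fun r iv =>
      if iv.2 == -1 then r
      else match last.get? iv.2 with
        | some j => r.insert iv.1 j
        | none => r)
    (PySem.Dict.empty)).items

-- ===== PRECONDITION & SPEC =====
def Spec_get_in_between_perm_matrix (perm_mat_1 : List Int) (perm_mat_2 : List Int) (out : List (Int × Int)) : Prop := out = get_in_between_perm_matrix_alt perm_mat_1 perm_mat_2
instance (perm_mat_1 : List Int) (perm_mat_2 : List Int) (out : List (Int × Int)) : Decidable (Spec_get_in_between_perm_matrix perm_mat_1 perm_mat_2 out) := by unfold Spec_get_in_between_perm_matrix; infer_instance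

-- ===== CLAIM (what is proved, stated in full; the proofs are below) =====
def Claim_equal_get_in_between_perm_matrix : Prop := ∀ (perm_mat_1 : List Int) (perm_mat_2 : List Int), Dom_get_in_between_perm_matrix perm_mat_1 perm_mat_2 → Spec_get_in_between_perm_matrix perm_mat_1 perm_mat_2 (get_in_between_perm_matrix perm_mat_1 perm_mat_2)

-- ===== LEMMAS AND PROOFS =====

theorem pv_pyGetD_append_left (p2 l : List Int) (j : Int) (d : Int)
    (h0 : 0 ≤ j) (h1 : j < (p2.length : Int)) :
    PySem.List.pyGetD (p2 ++ l) j d = PySem.List.pyGetD p2 j d := by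
  rw [PySem.List.pyGetD_eq_getElem _ d h0 (by simp; omega),
      PySem.List.pyGetD_eq_getElem _ d h0 h1]
  exact List.getElem_append_left (by omega)

theorem pv_pyGetD_append_last (p2 : List Int) (x : Int) (d : Int) :
    PySem.List.pyGetD (p2 ++ [x]) (p2.length : Int) d = x := by
  rw [PySem.List.pyGetD_eq_getElem _ d (by positivity) (by simp)]
  simp

theorem pv_buildLast_append (p2 : List Int) (x : Int) :
    pvBuildLast (p2 ++ [x])
      = if x == -1 then pvBuildLast p2
        else (pvBuildLast p2).insert x (p2.length : Int) := by
  unfold pvBuildLast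
  rw [PySem.List.enumerate_append, List.foldl_append]
  simp [PySem.List.enumerate]

-- A's inner loop over perm_mat_2, for a fixed row value v ≠ -1 and row index i,
-- equals a single lookup of the last index of v in perm_mat_2.
theorem pv_inner_eq (p2 : List Int) (v i : Int) (_hv : v ≠ -1) (d : PySem.Dict Int Int) :
    (PySem.List.pyRange 0 (PySem.List.len p2) 1).foldl (fun d j =>
        if PySem.List.pyGetD p2 j 0 == -1 then d
        else if v == PySem.List.pyGetD p2 j 0 then d.insert i j
        else d) d
      = match (pvBuildLast p2).get? v with
        | some j => d.insert i j
        | none => d := by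
  induction p2 using List.reverseRecOn with
  | nil =>
    simp [PySem.List.len_eq, PySem.List.pyRange_one_eq_nil le_rfl, pvBuildLast,
      PySem.List.enumerate, PySem.Dict.get?_empty]
  | append_singleton p2 x ih =>
    have hn : (0 : Int) ≤ (p2.length : Int) := by positivity
    simp only [PySem.List.len_eq] at ih ⊢
    rw [show ((p2 ++ [x]).length : Int) = (p2.length : Int) + 1 by simp,
        PySem.List.pyRange_one_succ_right hn, List.foldl_append,
        PySem.List.foldl_congr_mem _ _ (fun d j =>
          if PySem.List.pyGetD p2 j 0 == -1 then d
          else if v == PySem.List.pyGetD p2 j 0 then d.insert i j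
          else d) d (by
            intro acc j hj
            obtain ⟨h0, h1⟩ := PySem.List.mem_pyRange_one.mp hj
            rw [pv_pyGetD_append_left p2 [x] j 0 h0 h1]),
        ih, pv_buildLast_append]
    simp only [List.foldl_cons, List.foldl_nil, pv_pyGetD_append_last]
    by_cases hx : x = -1
    · simp [hx]
    · have hx' : (x == -1) = false := by simp [hx]
      simp only [hx', Bool.false_eq_true, if_false]
      by_cases hvx : v = x
      · subst hvx
        simp only [beq_self_eq_true, if_true, PySem.Dict.get?_insert_self]
        cases h : (pvBuildLast p2).get? v <;> simp [PySem.Dict.insert_insert_self]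
      · have hvx' : (v == x) = false := by simp [hvx]
        rw [PySem.Dict.get?_insert_of_ne _ _ hvx]
        simp [hvx']

theorem pv_outer_fold (p1 p2 : List Int) (d : PySem.Dict Int Int) :
    (PySem.List.pyRange 0 (PySem.List.len p1) 1).foldl (fun d i =>
        if PySem.List.pyGetD p1 i 0 == -1 then d
        else (PySem.List.pyRange 0 (PySem.List.len p2) 1).foldl (fun d j =>
          if PySem.List.pyGetD p2 j 0 == -1 then d
          else if PySem.List.pyGetD p1 i 0 == PySem.List.pyGetD p2 j 0 then d.insert i j
          else d) d) d
      = (PySem.List.enumerate p1).foldl (fun r iv =>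
          if iv.2 == -1 then r
          else match (pvBuildLast p2).get? iv.2 with
            | some j => r.insert iv.1 j
            | none => r) d := by
  induction p1 using List.reverseRecOn with
  | nil =>
    simp [PySem.List.len_eq, PySem.List.pyRange_one_eq_nil le_rfl, PySem.List.enumerate]
  | append_singleton p1 x ih =>
    have hn : (0 : Int) ≤ (p1.length : Int) := by positivity
    simp only [PySem.List.len_eq] at ih ⊢
    rw [show ((p1 ++ [x]).length : Int) = (p1.length : Int) + 1 by simp,
        PySem.List.pyRange_one_succ_right hn, List.foldl_append,
        PySem.List.foldl_congr_mem _ _ (fun d i =>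
          if PySem.List.pyGetD p1 i 0 == -1 then d
          else (PySem.List.pyRange 0 ((p2.length : Int)) 1).foldl (fun d j =>
            if PySem.List.pyGetD p2 j 0 == -1 then d
            else if PySem.List.pyGetD p1 i 0 == PySem.List.pyGetD p2 j 0 then d.insert i j
            else d) d) d (by
            intro acc i hi
            obtain ⟨h0, h1⟩ := PySem.List.mem_pyRange_one.mp hi
            rw [pv_pyGetD_append_left p1 [x] i 0 h0 h1]),
        ih, PySem.List.enumerate_append, List.foldl_append]
    simp only [PySem.List.enumerate, List.foldl_cons, List.foldl_nil, pv_pyGetD_append_last,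
      zero_add]
    by_cases hx : x = -1
    · simp [hx]
    · have hx' : (x == -1) = false := by simp [hx]
      simp only [hx', Bool.false_eq_true, if_false]
      have h := pv_inner_eq p2 x (p1.length : Int) hx
      simp only [PySem.List.len_eq] at h
      exact h _

theorem pv_outer_eq (p1 p2 : List Int) :
    get_in_between_perm_matrix p1 p2 = get_in_between_perm_matrix_alt p1 p2 := by
  unfold get_in_between_perm_matrix get_in_between_perm_matrix_alt
  rw [pv_outer_fold]

-- ===== VERDICT (by name: the statement is the Claim_ definition above) =====
theorem get_in_between_perm_matrix_spec : Claim_equal_get_in_between_perm_matrix := by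
  intro p1 p2 _
  unfold Spec_get_in_between_perm_matrix
  exact pv_outer_eq p1 p2
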